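-- pv_equiv track=rewrite | github.com/Subasri23Hub/infosys-springboard-narrative-flow | narrative.py | check_restricted_content
-- ===== SOURCE A (Python) =====
-- def check_restricted_content(text):
--
--     restricted_keywords = [
--         "politics", "election", "government", "political party",
--         "kill", "murder", "suicide", "violence", "harm",
--         "hack", "hacking", "cyber attack", "bypass security",
--         "password cracking", "malware", "phishing",
--         "fraud", "steal", "illegal activity"
--     ]
--
--     text_lower = text.lower()
--
--     for word in restricted_keywords:
--         if word in text_lower:
--             return False
--
--     return True
-- ===== SOURCE B (Python) =====
-- def check_restricted_content(text):
--
--     restricted_keywords = [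
--         "politics", "election", "government", "political party",
--         "kill", "murder", "suicide", "violence", "harm",
--         "hack", "hacking", "cyber attack", "bypass security",
--         "password cracking", "malware", "phishing",
--         "fraud", "steal", "illegal activity"
--     ]
--
--     text_lower = text.lower()
--
--     # single pass over positions: at each position test whether any keyword starts there
--     for i in range(len(text_lower)):
--         for word in restricted_keywords:
--             if text_lower.startswith(word, i):
--                 return False
--
--     return True
-- ===== Notes on version B (the rewrite author's own statement) =====
-- stated objective: alternative
-- what changed: Instead of one full substring scan of the text per keyword (19 passes), B makes a single left-to-right pass over the text and at each position tests whether any keyword starts there.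
import Mathlib
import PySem

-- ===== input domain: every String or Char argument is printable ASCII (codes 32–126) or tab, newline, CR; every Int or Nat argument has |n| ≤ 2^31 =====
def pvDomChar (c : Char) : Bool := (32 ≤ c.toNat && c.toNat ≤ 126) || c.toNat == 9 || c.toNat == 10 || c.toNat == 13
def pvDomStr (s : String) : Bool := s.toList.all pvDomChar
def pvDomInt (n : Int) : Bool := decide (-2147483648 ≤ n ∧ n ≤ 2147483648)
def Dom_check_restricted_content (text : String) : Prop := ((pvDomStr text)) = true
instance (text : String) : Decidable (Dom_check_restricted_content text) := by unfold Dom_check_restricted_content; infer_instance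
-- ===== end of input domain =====

-- B makes a single left-to-right pass over the lowered text, testing at each position
-- whether any keyword starts there, instead of A's one full substring scan per keyword.
-- Same return value everywhere; objective: alternative.

-- ===== PORT A =====
def pvKeywords : List String :=
  ["politics", "election", "government", "political party",
   "kill", "murder", "suicide", "violence", "harm",
   "hack", "hacking", "cyber attack", "bypass security",
   "password cracking", "malware", "phishing",
   "fraud", "steal", "illegal activity"]

-- for word in restricted_keywords: if word in text_lower: return False
def pvALoop (tl : String) : List String → Bool
  | [] => true
  | w :: ws => if PySem.Str.isIn w tl then false else pvALoop tl ws

def check_restricted_content (text : String) : Bool :=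
  pvALoop (PySem.Str.lower text) pvKeywords

-- ===== PORT B =====
def pvKeywordsChars : List (List Char) := pvKeywords.map String.toList

-- for i in range(len(text_lower)): for word in …: if text_lower.startswith(word, i): return False
def pvBScan : List Char → Bool
  | [] => true
  | c :: rest =>
    if pvKeywordsChars.any (fun k => PySem.Chars.startswith (c :: rest) k) then false
    else pvBScan rest

def check_restricted_content_alt (text : String) : Bool :=
  pvBScan (PySem.Str.lower text).toList

-- ===== PRECONDITION & SPEC =====
def Spec_check_restricted_content (text : String) (out : Bool) : Prop := out = check_restricted_content_alt text
instance (text : String) (out : Bool) : Decidable (Spec_check_restricted_content text out) := by unfold Spec_check_restricted_content; infer_instance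

-- ===== CLAIM (what is proved, stated in full; the proofs are below) =====
def Claim_equal_check_restricted_content : Prop := ∀ (text : String), Dom_check_restricted_content text → Spec_check_restricted_content text (check_restricted_content text)

-- ===== LEMMAS AND PROOFS =====

lemma pvKeywordsChars_ne_nil : ∀ k ∈ pvKeywordsChars, k ≠ [] := by decide

lemma pvALoop_eq_true (tl : String) (ws : List String) :
    pvALoop tl ws = true ↔ ∀ w ∈ ws, ¬ w.toList <:+: tl.toList := by
  induction ws with
  | nil => simp [pvALoop]
  | cons w ws ih =>
    rw [pvALoop]
    by_cases h : PySem.Str.isIn w tl = true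
    · rw [if_pos h]
      simp only [Bool.false_eq_true, false_iff]
      intro hall
      exact hall w (List.mem_cons_self ..) ((PySem.Str.isIn_iff_infix w tl).mp h)
    · rw [if_neg h, ih]
      have hni : ¬ w.toList <:+: tl.toList :=
        fun hc => h ((PySem.Str.isIn_iff_infix w tl).mpr hc)
      simp [hni]

lemma pvBScan_eq_true (s : List Char) :
    pvBScan s = true ↔ ∀ j, ∀ k ∈ pvKeywordsChars, ¬ k <+: s.drop j := by
  induction s with
  | nil =>
    simp only [pvBScan, List.drop_nil, true_iff]
    intro j k hk hpre
    exact pvKeywordsChars_ne_nil k hk (List.prefix_nil.mp hpre)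
  | cons c rest ih =>
    rw [pvBScan]
    by_cases h : pvKeywordsChars.any (fun k => PySem.Chars.startswith (c :: rest) k) = true
    · rw [if_pos h]
      simp only [Bool.false_eq_true, false_iff]
      intro hall
      obtain ⟨k, hk, hsw⟩ := List.any_eq_true.mp h
      exact hall 0 k hk (by simpa using (PySem.Chars.startswith_iff _ _).mp hsw)
    · rw [if_neg h, ih]
      constructor
      · intro hall j k hk
        cases j with
        | zero =>
          intro hpre
          exact h (List.any_eq_true.mpr
            ⟨k, hk, (PySem.Chars.startswith_iff _ _).mpr (by simpa using hpre)⟩)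
        | succ j => exact hall j k hk
      · intro hall j k hk
        exact hall (j + 1) k hk

lemma pv_eq (text : String) :
    check_restricted_content text = check_restricted_content_alt text := by
  unfold check_restricted_content check_restricted_content_alt
  rw [Bool.eq_iff_iff, pvALoop_eq_true, pvBScan_eq_true]
  constructor
  · intro hall j k hk hpre
    obtain ⟨w, hw, rfl⟩ := List.mem_map.mp hk
    exact hall w hw
      ((PySem.Chars.isIn_iff_infix _ _).mp ((PySem.Chars.exists_prefix_drop_iff_isIn _ _).mp ⟨j, hpre⟩))
  · intro hall w hw hinf
    obtain ⟨j, hpre⟩ := (PySem.Chars.exists_prefix_drop_iff_isIn _ _).mpr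
      ((PySem.Chars.isIn_iff_infix _ _).mpr hinf)
    exact hall j w.toList (List.mem_map.mpr ⟨w, hw, rfl⟩) hpre

-- ===== VERDICT (by name: the statement is the Claim_ definition above) =====
theorem check_restricted_content_spec : Claim_equal_check_restricted_content := by
  intro text _
  exact pv_eq text
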